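-- pv_equiv track=rewrite | github.com/jhonnyelhelou91/ProjectEuler | 59 - XOR Decryption.py | isValidKey
-- ===== SOURCE A (Python) =====
-- import string, itertools
--
-- def xorEncryption(c, key):
--     result = c ^ key
--     char = chr(result)
--     if char in alpha_low or char in alpha_up or char in others:
--         return True
--     return False
--
-- def isValidKey(cipher, key):
--     length = len(key)
--     text = 0
--     for i in range(0, len(cipher)):
--         k = key[i % length]
--         k_ord = ord(k)
--         if not xorEncryption(cipher[i], k_ord):
--             return 0
--         else:
--             text += cipher[i] ^ k_ord
--     return text
--
-- alpha_low = string.ascii_lowercase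
--
-- alpha_up = string.ascii_uppercase
--
-- others = ['0', '1', '2', '3', '4', '5', '6', '7', '8', '9', '+', '-', '*', '/', '|', '%', '`',
--           ' ', ';', ':', ',', '.', '?', "'", '\"', '-', '&', '(', ')', '{', '}', '[', ']']
-- ===== SOURCE B (Python) =====
-- import string
--
-- _VALID_CHARS = frozenset(string.ascii_lowercase + string.ascii_uppercase
--                          + "0123456789+-*/|%` ;:,.?'\"-&(){}[]")
--
-- def isValidKey(cipher, key):
--     # column-wise traversal: for each key position j, decode the positions
--     # j, j+length, j+2*length, ... that use that key character
--     length = len(key)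
--     total = 0
--     for j in range(length):
--         ko = ord(key[j])
--         for i in range(j, len(cipher), length):
--             v = cipher[i] ^ ko
--             if chr(v) not in _VALID_CHARS:
--                 return 0
--             total += v
--     return total
-- ===== Notes on version B (the rewrite author's own statement) =====
-- stated objective: alternative
-- what changed: A scans the cipher sequentially, computing the key index i % length per element inside one fused validate-and-accumulate loop; B traverses column-wise: for each key position j it decodes only the positions j, j+length, j+2*length, ... (range with step), fetching ord(key[j]) once per column, no modulo anywhere; correctness relies on the sum being order-independent and 'return 0 on any invalid byte' being order-independent too.
-- outside the precondition, e.g. on isValidKey([1], ['a', 'bc']): A returns 96, B raises TypeError; on isValidKey([200, -5], ['a']): A returns 0, B returns 0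
import Mathlib
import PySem

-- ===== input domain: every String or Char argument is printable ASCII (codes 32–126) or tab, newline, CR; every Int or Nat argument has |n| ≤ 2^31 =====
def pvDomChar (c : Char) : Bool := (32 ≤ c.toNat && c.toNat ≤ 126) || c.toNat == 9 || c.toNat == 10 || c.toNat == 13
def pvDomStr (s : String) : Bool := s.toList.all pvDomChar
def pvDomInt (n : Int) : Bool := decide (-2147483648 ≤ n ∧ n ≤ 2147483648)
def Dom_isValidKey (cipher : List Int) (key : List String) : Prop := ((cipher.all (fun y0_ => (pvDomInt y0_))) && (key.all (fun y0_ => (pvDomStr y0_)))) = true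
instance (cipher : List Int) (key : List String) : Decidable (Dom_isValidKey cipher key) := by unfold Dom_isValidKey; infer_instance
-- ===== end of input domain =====

-- B replaces A's sequential fused loop (key index i % length recomputed per element) by a
-- column-wise traversal: one pass per key position j over the cipher positions j, j+L, j+2L, …
-- (objective: alternative; no speed claim).

-- ===== PORT A =====
def pvAlphaLow : String := "abcdefghijklmnopqrstuvwxyz"

def pvAlphaUp : String := "ABCDEFGHIJKLMNOPQRSTUVWXYZ"

def pvOthers : List String := ["0", "1", "2", "3", "4", "5", "6", "7", "8", "9", "+", "-", "*", "/", "|", "%", "`",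
  " ", ";", ":", ",", ".", "?", "'", "\"", "-", "&", "(", ")", "{", "}", "[", "]"]

-- ord(s) for a one-character string; the multi-character case (TypeError) is excluded by Pre_
def pvOrd (s : String) : Int :=
  match s.toList with
  | [c] => (c.toNat : Int)
  | _ => 0

-- chr(n): exact for valid codepoints; a surrogate code maps to NUL, which like the surrogate
-- itself lies outside every membership list tested below, so the branch taken is Python's
def pvChr (v : Int) : String := String.ofList [Char.ofNat v.toNat]

def xorEncryption (c key : Int) : Bool :=
  let result := PySem.Int.bxor c key
  let char := pvChr result
  if PySem.Str.isIn char pvAlphaLow || PySem.Str.isIn char pvAlphaUp || pvOthers.contains char then true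
  else false

def isValidKeyGo (key : List String) (length : Int) : List Int → Int → Int → Int
  | [], _, text => text
  | c :: rest, i, text =>
    let k := PySem.List.pyGetD key (PySem.Int.mod i length) ""
    let k_ord := pvOrd k
    if !(xorEncryption c k_ord) then 0
    else isValidKeyGo key length rest (i + 1) (text + PySem.Int.bxor c k_ord)

def isValidKey (cipher : List Int) (key : List String) : Int :=
  isValidKeyGo key (key.length : Int) cipher 0 0

-- ===== PORT B =====
def pvValidChars : PySem.Set String :=
  PySem.Set.ofList
    ((pvAlphaLow.toList ++ pvAlphaUp.toList ++ "0123456789+-*/|%` ;:,.?'\"-&(){}[]".toList).map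
      (fun ch => String.ofList [ch]))

-- inner loop: 'for i in range(j, len(cipher), length)' — none = 'return 0'
def altInner (cipher : List Int) (ko : Int) : List Int → Int → Option Int
  | [], total => some total
  | i :: rest, total =>
    let v := PySem.Int.bxor (PySem.List.pyGetD cipher i 0) ko
    if !(PySem.Set.contains pvValidChars (pvChr v)) then none
    else altInner cipher ko rest (total + v)

-- outer loop over the key positions j
def altOuter (cipher : List Int) (key : List String) (length : Int) : List Int → Int → Int
  | [], total => total
  | j :: rest, total =>
    match altInner cipher (pvOrd (PySem.List.pyGetD key j "")) (PySem.List.pyRange j (cipher.length : Int) length) total with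
    | none => 0
    | some t => altOuter cipher key length rest t

def isValidKey_alt (cipher : List Int) (key : List String) : Int :=
  let length := (key.length : Int)
  altOuter cipher key length (PySem.List.pyRange 0 length 1) 0

-- ===== PRECONDITION & SPEC =====
-- Pre_ excludes: empty key with non-empty cipher (A raises ZeroDivisionError); key lists with a
-- non-single-character entry, where ord raises TypeError in whichever program reaches it first
-- (A can instead return a value earlier — a prefix sum, or 0 on an earlier invalid byte — while
-- B's column pass ords every key entry and raises; see cites); and ciphers containing a value
-- outside chr's range, on which A raises ValueError from chr unless an earlier invalid character
-- already made it return 0 first (B, testing ord codes, returns 0 there too; see cites).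
def Pre_isValidKey (cipher : List Int) (key : List String) : Prop :=
  (cipher ≠ [] → key ≠ []) ∧
  (∀ s ∈ key, s.toList.length = 1) ∧
  (∀ c ∈ cipher, 0 ≤ c ∧ c < 1114112)
instance (cipher : List Int) (key : List String) : Decidable (Pre_isValidKey cipher key) := by
  unfold Pre_isValidKey; infer_instance

def pvWitness_isValidKey : List Int × List String := ([105, 32], ["a"])

def Spec_isValidKey (cipher : List Int) (key : List String) (out : Int) : Prop := out = isValidKey_alt cipher key
instance (cipher : List Int) (key : List String) (out : Int) : Decidable (Spec_isValidKey cipher key out) := by unfold Spec_isValidKey; infer_instance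

-- ===== CLAIM (what is proved, stated in full; the proofs are below) =====
def Claim_equal_isValidKey : Prop := ∀ (cipher : List Int) (key : List String), Dom_isValidKey cipher key → Pre_isValidKey cipher key → Spec_isValidKey cipher key (isValidKey cipher key)


-- ===== LEMMAS AND PROOFS =====

-- the membership test A performs on the character chr(v)
def pvCharTest (c : Char) : Bool :=
  PySem.Str.isIn (String.ofList [c]) pvAlphaLow || PySem.Str.isIn (String.ofList [c]) pvAlphaUp ||
    pvOthers.contains (String.ofList [c])

-- the distinct elements of pvValidChars, as a literal list
def pvStrsLit : List String := ["a", "b", "c", "d", "e", "f", "g", "h", "i", "j", "k", "l", "m", "n", "o", "p", "q", "r", "s", "t", "u", "v", "w", "x", "y", "z", "A", "B", "C", "D", "E", "F", "G", "H", "I", "J", "K", "L", "M", "N", "O", "P", "Q", "R", "S", "T", "U", "V", "W", "X", "Y", "Z", "0", "1", "2", "3", "4", "5", "6", "7", "8", "9", "+", "-", "*", "/", "|", "%", "`", " ", ";", ":", ",", ".", "?", "'", "\"", "&", "(", ")", "{", "}", "[", "]"]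

set_option maxRecDepth 16384 in
lemma pvValidChars_eq : pvValidChars = pvStrsLit := by decide

lemma pvOfList_eq_iff (c : Char) (s : String) : String.ofList [c] = s ↔ [c] = s.toList := by
  constructor
  · intro h; have := congrArg String.toList h; simpa using this
  · intro h; rw [show s = String.ofList s.toList by simp, ← h]

lemma pvSingleton_infix {c : Char} {l : List Char} (h : [c] <:+: l) : c ∈ l :=
  h.mem (by simp)

-- a character passing A's membership test has code in [32, 126]
set_option maxRecDepth 4096 in
lemma pvValidChars_bound : ((pvAlphaLow.toList ++ pvAlphaUp.toList ++
    "0123456789+-*/|%` ;:,.?'\"-&(){}[]".toList).all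
    (fun d => 32 ≤ d.toNat && d.toNat ≤ 126)) = true := by decide

set_option maxRecDepth 4096 in
lemma pvOthers_eq_map : pvOthers = "0123456789+-*/|%` ;:,.?'\"-&(){}[]".toList.map
    (fun d => String.ofList [d]) := by decide

lemma pvCharTest_bound (c : Char) (h : pvCharTest c = true) : 32 ≤ c.toNat ∧ c.toNat ≤ 126 := by
  have hb : ∀ d ∈ pvAlphaLow.toList ++ pvAlphaUp.toList ++
      "0123456789+-*/|%` ;:,.?'\"-&(){}[]".toList, 32 ≤ d.toNat ∧ d.toNat ≤ 126 := by
    intro d hd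
    have := List.all_eq_true.mp pvValidChars_bound d hd
    simp only [Bool.and_eq_true, decide_eq_true_eq] at this
    exact this
  simp only [pvCharTest, Bool.or_eq_true, PySem.Str.isIn] at h
  rcases h with (h | h) | h
  · exact hb c (by simp; exact Or.inl (pvSingleton_infix ((PySem.Chars.isIn_iff_infix _ _).mp (by simpa using h))))
  · exact hb c (by simp; exact Or.inr (Or.inl (pvSingleton_infix ((PySem.Chars.isIn_iff_infix _ _).mp (by simpa using h)))))
  · rw [pvOthers_eq_map] at h
    have hm : String.ofList [c] ∈ "0123456789+-*/|%` ;:,.?'\"-&(){}[]".toList.map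
        (fun d => String.ofList [d]) := by simpa using h
    obtain ⟨d, hd, hde⟩ := List.mem_map.mp hm
    have hdc : [d] = [c] := by simpa using (pvOfList_eq_iff d (String.ofList [c])).mp hde
    exact hb c (by simp; exact Or.inr (Or.inr (by simpa [← List.singleton_inj.mp hdc] using hd)))

-- A's test and B's test agree on every code below 128, checked by computation
set_option maxRecDepth 4096 in
lemma pvKey : ((List.range 128).all
    (fun n => pvCharTest (Char.ofNat n) == pvStrsLit.contains (String.ofList [Char.ofNat n]))) = true := by decide

set_option maxRecDepth 4096 in
lemma pvStrsLit_bound : (pvStrsLit.all (fun s => match s.toList with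
  | [d] => 32 ≤ d.toNat && d.toNat ≤ 126
  | _ => false)) = true := by decide

-- the character membership A tests equals the set membership B tests, for every code v
lemma pvClassify (v : Int) : pvCharTest (Char.ofNat v.toNat) = PySem.Set.contains pvValidChars (pvChr v) := by
  rw [pvValidChars_eq, PySem.Set.contains_eq_listContains]
  unfold pvChr
  by_cases h0 : 0 ≤ v ∧ v < 128
  · have key := List.all_eq_true.mp pvKey v.toNat (List.mem_range.mpr (by omega))
    exact eq_of_beq key
  · have hbnd : ¬ (32 ≤ (Char.ofNat v.toNat).toNat ∧ (Char.ofNat v.toNat).toNat ≤ 126) := by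
      have ht := Char.toNat_ofNat v.toNat
      split at ht <;> omega
    have hR : pvStrsLit.contains (String.ofList [Char.ofNat v.toNat]) = false := by
      rw [← Bool.not_eq_true, List.contains_iff_mem]
      intro hm
      have := List.all_eq_true.mp pvStrsLit_bound _ hm
      simp only [String.toList_ofList] at this
      simp only [Bool.and_eq_true, decide_eq_true_eq] at this
      exact hbnd this
    have hL : pvCharTest (Char.ofNat v.toNat) = false := by
      rw [← Bool.not_eq_true]
      intro hc
      exact hbnd (pvCharTest_bound _ hc)
    rw [hR, hL]

lemma xorEncryption_eq (c k : Int) :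
    xorEncryption c k = PySem.Set.contains pvValidChars (pvChr (PySem.Int.bxor c k)) := by
  have h1 : xorEncryption c k = pvCharTest (Char.ofNat (PySem.Int.bxor c k).toNat) := by
    unfold xorEncryption pvChr pvCharTest
    dsimp only
    split
    next h => exact h.symm
    next h => exact ((by simpa using h : _ = false)).symm
  rw [h1, pvClassify]

-- A's fused loop computes 'if all decoded values are valid then text + their sum else 0'
lemma go_eq (key : List String) (L : Int) (cs : List Int) (i text : Int) :
    isValidKeyGo key L cs i text =
      (let vals := (PySem.List.enumerate cs i).map
        (fun ic => PySem.Int.bxor ic.2 (pvOrd (PySem.List.pyGetD key (PySem.Int.mod ic.1 L) "")));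
       if vals.all (fun v => PySem.Set.contains pvValidChars (pvChr v)) then text + vals.sum else 0) := by
  induction cs generalizing i text with
  | nil => simp [isValidKeyGo, PySem.List.enumerate_nil]
  | cons c rest ih =>
    simp only [isValidKeyGo, PySem.List.enumerate_cons, List.map_cons, List.all_cons, List.sum_cons]
    rw [xorEncryption_eq]
    by_cases h : PySem.Set.contains pvValidChars
        (pvChr (PySem.Int.bxor c (pvOrd (PySem.List.pyGetD key (PySem.Int.mod i L) "")))) = true
    · simp only [h, Bool.not_true, Bool.false_eq_true, if_false, ih, Bool.true_and]
      split
      · ring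
      · rfl
    · rw [Bool.not_eq_true] at h
      simp only [h, Bool.not_false, if_true, Bool.false_and, Bool.false_eq_true, if_false]

-- B's inner loop computes the same shape over one column (none = 'return 0')
lemma altInner_eq (cipher : List Int) (ko : Int) (idxs : List Int) (total : Int) :
    altInner cipher ko idxs total =
      (let vals := idxs.map (fun i => PySem.Int.bxor (PySem.List.pyGetD cipher i 0) ko);
       if vals.all (fun v => PySem.Set.contains pvValidChars (pvChr v)) then some (total + vals.sum) else none) := by
  induction idxs generalizing total with
  | nil => simp [altInner]
  | cons i rest ih =>
    simp only [altInner, List.map_cons, List.all_cons, List.sum_cons]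
    by_cases h : PySem.Set.contains pvValidChars (pvChr (PySem.Int.bxor (PySem.List.pyGetD cipher i 0) ko)) = true
    · simp only [h, Bool.not_true, Bool.false_eq_true, if_false, ih, Bool.true_and]
      split
      · simp only [Option.some.injEq]; ring
      · rfl
    · rw [Bool.not_eq_true] at h
      simp only [h, Bool.not_false, if_true, Bool.false_and, Bool.false_eq_true, if_false]

-- the column value list of key position j
def colVals (cipher : List Int) (key : List String) (L : Int) (j : Int) : List Int :=
  (PySem.List.pyRange j (cipher.length : Int) L).map
    (fun i => PySem.Int.bxor (PySem.List.pyGetD cipher i 0) (pvOrd (PySem.List.pyGetD key j "")))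

-- B's outer loop computes the same shape over the concatenation of the columns
lemma altOuter_eq (cipher : List Int) (key : List String) (L : Int) (js : List Int) (total : Int) :
    altOuter cipher key L js total =
      (let vals := js.flatMap (colVals cipher key L);
       if vals.all (fun v => PySem.Set.contains pvValidChars (pvChr v)) then total + vals.sum else 0) := by
  induction js generalizing total with
  | nil => simp [altOuter]
  | cons j rest ih =>
    simp only [altOuter, List.flatMap_cons, List.all_append, List.sum_append, altInner_eq, colVals]
    by_cases h : ((PySem.List.pyRange j (cipher.length : Int) L).map
        (fun i => PySem.Int.bxor (PySem.List.pyGetD cipher i 0) (pvOrd (PySem.List.pyGetD key j "")))).all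
        (fun v => PySem.Set.contains pvValidChars (pvChr v)) = true
    · simp only [h, if_true, ih, Bool.true_and]
      split
      · ring
      · rfl
    · rw [Bool.not_eq_true] at h
      simp only [h, if_false, Bool.false_and, Bool.false_eq_true, if_false]

-- the row (sequential) value list, indexed over pyRange instead of enumerate
lemma enum_map (full : List Int) (F : Int → Int → Int) :
    ∀ (xs : List Int) (s : Nat), full.drop s = xs →
    (PySem.List.enumerate xs (s : Int)).map (fun ic => F ic.1 ic.2)
      = (PySem.List.pyRange (s : Int) (full.length : Int) 1).map
          (fun i => F i (PySem.List.pyGetD full i 0)) := by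
  intro xs
  induction xs with
  | nil =>
    intro s hd
    have hs : full.length ≤ s := by
      by_contra hlt
      have := congrArg List.length hd
      simp [List.length_drop] at this
      omega
    rw [PySem.List.pyRange_one_eq_nil (by exact_mod_cast hs)]
    simp [PySem.List.enumerate_nil]
  | cons x xs ih =>
    intro s hd
    have hs : s < full.length := by
      by_contra hge
      have := congrArg List.length hd
      simp [List.length_drop] at this
      omega
    have hx : full.getD s 0 = x := by
      have : (full.drop s).getD 0 0 = x := by rw [hd]; rfl
      simpa [List.getD_eq_getElem?_getD, List.getElem?_drop] using this
    have htail : full.drop (s + 1) = xs := by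
      have : (full.drop s).drop 1 = xs := by rw [hd]; rfl
      simpa [List.drop_drop] using this
    rw [PySem.List.pyRange_one_cons (by exact_mod_cast hs)]
    simp only [PySem.List.enumerate_cons, List.map_cons]
    congr 1
    · rw [PySem.List.pyGetD_natCast, hx]
    · have := ih (s + 1) htail
      rw [show ((s : Int) + 1) = ((s + 1 : Nat) : Int) by push_cast; ring]
      exact this

-- every index of column j is nonnegative, below n, and ≡ j (mod L)
lemma mem_col_facts {j L i n : Int} (hL : 0 < L) (hj0 : 0 ≤ j) (hjL : j < L)
    (hi : i ∈ PySem.List.pyRange j n L) :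
    0 ≤ i ∧ i < n ∧ PySem.Int.mod i L = j := by
  obtain ⟨hji, hin, c, hc⟩ := (PySem.List.mem_pyRange_iff_of_pos hL i).mp hi
  have hfm := PySem.Int.floordiv_mul_add_mod i L
  have h1 := PySem.Int.mod_nonneg i hL
  have h2 := PySem.Int.mod_lt i hL
  have hdq : L ∣ (PySem.Int.mod i L - j) :=
    ⟨c - PySem.Int.floordiv i L, by linear_combination hfm + hc⟩
  have := Int.eq_zero_of_abs_lt_dvd hdq (by rw [abs_lt]; constructor <;> omega)
  exact ⟨by omega, hin, by omega⟩

-- the columns' index lists together are a permutation of the row index list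
lemma col_perm_row (n : Nat) (L : Int) (hL : 0 < L) :
    ((PySem.List.pyRange 0 L 1).flatMap (fun j => PySem.List.pyRange j (n : Int) L)).Perm
      (PySem.List.pyRange 0 (n : Int) 1) := by
  have hcolnodup : ∀ j : Int, (PySem.List.pyRange j (n : Int) L).Nodup := by
    intro j
    rw [PySem.List.pyRange_of_pos j (n : Int) hL]
    refine List.Nodup.map ?_ (List.nodup_range)
    intro a b hab
    have h' : L * (a : Int) = L * (b : Int) := by linarith
    have := mul_left_cancel₀ (by omega : L ≠ 0) h'
    exact_mod_cast this
  rw [List.perm_ext_iff_of_nodup ?nd1 (PySem.List.nodup_pyRange_one 0 (n : Int))]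
  case nd1 =>
    rw [List.nodup_flatMap]
    constructor
    · intro j _; exact hcolnodup j
    · rw [List.pairwise_iff_forall_sublist]
      intro j j' hsub
      have hmem : j ∈ PySem.List.pyRange 0 L 1 ∧ j' ∈ PySem.List.pyRange 0 L 1 := by
        constructor <;> [exact hsub.subset (by simp); exact hsub.subset (by simp)]
      have hne : j ≠ j' := by
        intro h
        rw [h] at hsub
        have hnd := hsub.nodup (PySem.List.nodup_pyRange_one 0 L)
        simp at hnd
      intro x hx hx'
      obtain ⟨hj0, hjL⟩ := (PySem.List.mem_pyRange_one.mp hmem.1)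
      obtain ⟨hj0', hjL'⟩ := (PySem.List.mem_pyRange_one.mp hmem.2)
      have f1 := mem_col_facts hL hj0 hjL hx
      have f2 := mem_col_facts hL hj0' hjL' hx'
      exact hne (by omega)
  intro t
  simp only [List.mem_flatMap, PySem.List.mem_pyRange_one]
  constructor
  · rintro ⟨j, ⟨hj0, hjL⟩, ht⟩
    have := mem_col_facts hL hj0 hjL ht
    omega
  · rintro ⟨ht0, htn⟩
    have hfm := PySem.Int.floordiv_mul_add_mod t L
    have hm0 := PySem.Int.mod_nonneg t hL
    have hmL := PySem.Int.mod_lt t hL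
    have hfd0 : 0 ≤ PySem.Int.floordiv t L := by nlinarith
    have hfl0 : 0 ≤ PySem.Int.floordiv t L * L := mul_nonneg hfd0 (by omega)
    refine ⟨PySem.Int.mod t L, ⟨hm0, hmL⟩, ?_⟩
    rw [PySem.List.mem_pyRange_iff_of_pos hL]
    refine ⟨by linarith, htn, ⟨PySem.Int.floordiv t L, by linarith [mul_comm (PySem.Int.floordiv t L) L]⟩⟩

-- ===== VERDICT (by name: the statement is the Claim_ definition above) =====
theorem isValidKey_spec : Claim_equal_isValidKey := by
  intro cipher key _ hpre
  obtain ⟨hnil, hkey1, hcr⟩ := hpre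
  unfold Spec_isValidKey isValidKey isValidKey_alt
  by_cases hk : key = []
  · subst hk
    have hc : cipher = [] := by
      by_contra h; exact (hnil h) rfl
    subst hc
    rfl
  · have hL : 0 < (key.length : Int) := by
      have : 0 < key.length := List.length_pos_iff.mpr hk
      exact_mod_cast this
    rw [go_eq, altOuter_eq]
    simp only [zero_add]
    -- both sides are 'if all valid then sum else 0' over value lists that are permutations
    set P : Int → Bool := fun v => PySem.Set.contains pvValidChars (pvChr v) with hP
    have hrow : (PySem.List.enumerate cipher 0).map
        (fun ic => PySem.Int.bxor ic.2 (pvOrd (PySem.List.pyGetD key (PySem.Int.mod ic.1 (key.length : Int)) "")))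
        = (PySem.List.pyRange 0 (cipher.length : Int) 1).map
          (fun i => PySem.Int.bxor (PySem.List.pyGetD cipher i 0)
            (pvOrd (PySem.List.pyGetD key (PySem.Int.mod i (key.length : Int)) ""))) := by
      simpa using enum_map cipher
        (fun i c => PySem.Int.bxor c (pvOrd (PySem.List.pyGetD key (PySem.Int.mod i (key.length : Int)) "")))
        cipher 0 (by simp)
    have hcol : (PySem.List.pyRange 0 (key.length : Int) 1).flatMap
        (colVals cipher key (key.length : Int))
        = ((PySem.List.pyRange 0 (key.length : Int) 1).flatMap
            (fun j => PySem.List.pyRange j (cipher.length : Int) (key.length : Int))).map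
          (fun i => PySem.Int.bxor (PySem.List.pyGetD cipher i 0)
            (pvOrd (PySem.List.pyGetD key (PySem.Int.mod i (key.length : Int)) ""))) := by
      rw [List.map_flatMap]
      apply List.flatMap_congr  -- congruence over members
      intro j hj
      obtain ⟨hj0, hjL⟩ := PySem.List.mem_pyRange_one.mp hj
      unfold colVals
      apply List.map_congr_left
      intro i hi
      have := mem_col_facts hL hj0 hjL hi
      rw [this.2.2]
    have hperm : (((PySem.List.pyRange 0 (key.length : Int) 1).flatMap
        (fun j => PySem.List.pyRange j (cipher.length : Int) (key.length : Int))).map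
          (fun i => PySem.Int.bxor (PySem.List.pyGetD cipher i 0)
            (pvOrd (PySem.List.pyGetD key (PySem.Int.mod i (key.length : Int)) "")))).Perm
        ((PySem.List.pyRange 0 (cipher.length : Int) 1).map
          (fun i => PySem.Int.bxor (PySem.List.pyGetD cipher i 0)
            (pvOrd (PySem.List.pyGetD key (PySem.Int.mod i (key.length : Int)) "")))) :=
      (col_perm_row cipher.length (key.length : Int) hL).map _
    rw [hcol, hrow]
    have hall : ∀ {l1 l2 : List Int}, l1.Perm l2 → l1.all P = l2.all P := by
      intro l1 l2 hp
      by_cases h : l1.all P = true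
      · rw [h]
        exact (List.all_eq_true.mpr fun x hx => List.all_eq_true.mp h x (hp.mem_iff.mpr hx)).symm
      · have h2 : ¬ l2.all P = true := fun hh =>
          h (List.all_eq_true.mpr fun x hx => List.all_eq_true.mp hh x (hp.mem_iff.mp hx))
        rw [Bool.not_eq_true] at h h2
        rw [h, h2]
    rw [hall hperm.symm, hperm.sum_eq]
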